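-- pv_equiv track=rewrite | github.com/kamko/aoc-2021 | day17/day17.py | x_pos
-- ===== SOURCE A (Python) =====
-- def x_pos(velocity, steps):
--     x_pos = 0
--     for i in range(steps):
--         x_pos += velocity
--         if velocity > 0:
--             velocity -= 1
--         elif velocity < 0:
--             velocity += 1
--
--     return x_pos
-- ===== SOURCE B (Python) =====
-- def x_pos(velocity, steps):
--     # Closed form: the x velocity decays toward 0, so displacement is the
--     # arithmetic series of the first n = max(0, min(steps, |velocity|)) terms.
--     n = min(steps, abs(velocity))
--     if n < 0:
--         n = 0
--     total = n * (2 * abs(velocity) - n + 1) // 2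
--     return total if velocity >= 0 else -total
-- ===== Notes on version B (the rewrite author's own statement) =====
-- stated objective: faster
-- what changed: Replaced the per-step simulation loop by a closed-form arithmetic-series formula over n = max(0, min(steps, |velocity|)).
import Mathlib
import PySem

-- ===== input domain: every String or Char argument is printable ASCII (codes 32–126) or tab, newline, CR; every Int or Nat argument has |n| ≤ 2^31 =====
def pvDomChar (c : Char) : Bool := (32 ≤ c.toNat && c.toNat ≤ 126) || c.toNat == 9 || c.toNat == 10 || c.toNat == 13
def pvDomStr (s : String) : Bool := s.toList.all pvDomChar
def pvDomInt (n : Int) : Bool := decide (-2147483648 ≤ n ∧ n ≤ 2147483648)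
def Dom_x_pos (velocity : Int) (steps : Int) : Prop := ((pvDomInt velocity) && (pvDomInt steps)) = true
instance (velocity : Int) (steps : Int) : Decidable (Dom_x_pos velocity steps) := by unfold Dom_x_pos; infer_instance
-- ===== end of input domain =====

-- B replaces A's per-step simulation loop by a closed-form arithmetic-series formula (O(1) instead of O(steps)).


-- ===== PORT A =====
-- the for-loop over range(steps): it runs max(steps, 0) = steps.toNat times, index unused
def xposLoop : Nat → Int → Int → Int
  | 0, x, _ => x
  | n + 1, x, v => xposLoop n (x + v) (if v > 0 then v - 1 else if v < 0 then v + 1 else v)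

def x_pos (velocity : Int) (steps : Int) : Int := xposLoop steps.toNat 0 velocity

-- ===== PORT B =====
def x_pos_alt (velocity : Int) (steps : Int) : Int :=
  let n0 := min steps velocity.natAbs
  let n : Int := if n0 < 0 then 0 else n0
  let total := PySem.Int.floordiv (n * (2 * (velocity.natAbs : Int) - n + 1)) 2
  if velocity ≥ 0 then total else -total

-- ===== PRECONDITION & SPEC =====
def Spec_x_pos (velocity : Int) (steps : Int) (out : Int) : Prop := out = x_pos_alt velocity steps
instance (velocity : Int) (steps : Int) (out : Int) : Decidable (Spec_x_pos velocity steps out) := by unfold Spec_x_pos; infer_instance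

-- ===== CLAIM (what is proved, stated in full; the proofs are below) =====
def Claim_equal_x_pos : Prop := ∀ (velocity : Int) (steps : Int), Dom_x_pos velocity steps → Spec_x_pos velocity steps (x_pos velocity steps)

-- ===== LEMMAS AND PROOFS =====
theorem xposLoop_zero (n : Nat) (x : Int) : xposLoop n x 0 = x := by
  induction n generalizing x with
  | zero => simp [xposLoop]
  | succ n ih => simp [xposLoop, ih]

theorem xposLoop_acc (n : Nat) (x v : Int) : xposLoop n x v = x + xposLoop n 0 v := by
  induction n generalizing x v with
  | zero => simp [xposLoop]
  | succ n ih =>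
    simp only [xposLoop]
    rw [ih (x + v), ih (0 + v)]
    ring

theorem xposLoop_neg (n : Nat) (v : Int) : xposLoop n 0 (-v) = -xposLoop n 0 v := by
  induction n generalizing v with
  | zero => simp [xposLoop]
  | succ n ih =>
    rcases lt_trichotomy v 0 with h | h | h
    · have h1 : (if -v > 0 then -v - 1 else if -v < 0 then -v + 1 else -v) = -(v + 1) := by
        split_ifs <;> omega
      have h2 : (if v > 0 then v - 1 else if v < 0 then v + 1 else v) = v + 1 := by
        split_ifs <;> omega
      simp only [xposLoop]
      rw [h1, h2, xposLoop_acc n (0 + -v), xposLoop_acc n (0 + v), ih (v + 1)]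
      ring
    · subst h
      simp [xposLoop_zero]
    · have h1 : (if -v > 0 then -v - 1 else if -v < 0 then -v + 1 else -v) = -(v - 1) := by
        split_ifs <;> omega
      have h2 : (if v > 0 then v - 1 else if v < 0 then v + 1 else v) = v - 1 := by
        split_ifs <;> omega
      simp only [xposLoop]
      rw [h1, h2, xposLoop_acc n (0 + -v), xposLoop_acc n (0 + v), ih (v - 1)]
      ring

theorem xposLoop_closed (n : Nat) (v : Int) (hv : 0 ≤ v) :
    2 * xposLoop n 0 v = min (n : Int) v * (2 * v - min (n : Int) v + 1) := by
  induction n generalizing v with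
  | zero => simp [xposLoop, min_eq_left hv]
  | succ n ih =>
    rcases eq_or_lt_of_le hv with h | h
    · subst h
      have hm : min (((n + 1 : Nat)) : Int) 0 = 0 := by push_cast; omega
      rw [hm, xposLoop_zero]
      ring
    · have hm : min (((n + 1 : Nat)) : Int) v = min ((n : Nat) : Int) (v - 1) + 1 := by
        push_cast; omega
      have h2 := ih (v - 1) (by omega)
      simp only [xposLoop]
      rw [if_pos h, xposLoop_acc n (0 + v), hm]
      linear_combination h2

theorem floordiv_two_mul (a : Int) : PySem.Int.floordiv (2 * a) 2 = a := by
  rw [PySem.Int.floordiv_eq_ediv_of_pos (by omega)]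
  omega

-- ===== VERDICT (by name: the statement is the Claim_ definition above) =====
theorem x_pos_spec : Claim_equal_x_pos := by
  intro v steps _
  unfold Spec_x_pos x_pos x_pos_alt
  rcases le_or_gt 0 v with hv | hv
  · rw [if_pos hv]
    have habs : (v.natAbs : Int) = v := Int.natAbs_of_nonneg hv
    simp only [habs]
    have hmm : (if min steps v < 0 then (0 : Int) else min steps v)
        = min ((steps.toNat : Int)) v := by split_ifs <;> omega
    rw [hmm, ← floordiv_two_mul (xposLoop steps.toNat 0 v), xposLoop_closed steps.toNat v hv]
  · rw [if_neg (by omega)]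
    have habs : (v.natAbs : Int) = -v := by omega
    simp only [habs]
    have hmm : (if min steps (-v) < 0 then (0 : Int) else min steps (-v))
        = min ((steps.toNat : Int)) (-v) := by split_ifs <;> omega
    have hL : xposLoop steps.toNat 0 v = -xposLoop steps.toNat 0 (-v) := by
      rw [xposLoop_neg]; ring
    rw [hmm, hL, ← floordiv_two_mul (xposLoop steps.toNat 0 (-v)),
        xposLoop_closed steps.toNat (-v) (by omega)]
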